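-- pv_equiv track=rewrite | github.com/yooooonzzzzzang/Algo_seed | 백준/Gold/2247. 실질적 약수/실질적 약수.py | csod
-- ===== SOURCE A (Python) =====
-- def csod(n):
--     answer = 0
--     i =2
--     while i <= n//2:
--         k = n//i
--         b = n//k
--         c = (k-1) * (b -i+1)*(i+b)//2
--         answer = (answer + c) % 1000000
--         i = b+1
--     return answer
-- ===== SOURCE B (Python) =====
-- def csod(n):
--     # count pairs (i, q) with i >= 2, q >= 2, i*q <= n, weighted by i,
--     # split along the hyperbola at s = isqrt(n)
--     s = 1
--     while (s + 1) * (s + 1) <= n: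
--         s += 1
--     total = 0
--     for i in range(2, s + 1):
--         total += (n // i - 1) * i
--     for q in range(2, s + 1):
--         h = n // q
--         total += h * (h + 1) // 2 - s * (s + 1) // 2
--     return total % 1000000
-- ===== Notes on version B (the rewrite author's own statement) =====
-- stated objective: alternative
-- what changed: Replaced A's quotient-block while loop (jumping i to n//(n//i)+1 and adding a per-block arithmetic-series closed form with a running mod) by a hyperbola split at a hand-rolled isqrt: two plain for-loops up to sqrt(n) summing (n//i-1)*i and triangular-number differences, with a single final mod.
import Mathlib
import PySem

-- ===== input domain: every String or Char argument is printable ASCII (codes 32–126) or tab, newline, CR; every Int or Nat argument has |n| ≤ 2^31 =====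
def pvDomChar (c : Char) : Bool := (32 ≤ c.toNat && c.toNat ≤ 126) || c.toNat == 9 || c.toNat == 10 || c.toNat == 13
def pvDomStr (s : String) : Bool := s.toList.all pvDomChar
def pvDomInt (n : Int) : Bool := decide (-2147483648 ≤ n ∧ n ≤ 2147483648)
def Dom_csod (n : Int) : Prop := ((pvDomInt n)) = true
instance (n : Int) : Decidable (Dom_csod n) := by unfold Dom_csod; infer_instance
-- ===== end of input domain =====

-- B replaces A's quotient-block while loop by a hyperbola split at isqrt(n): an alternative
-- algorithm of the same O(sqrt n) cost ("alternative", not claimed faster).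

-- ===== PORT A =====
-- termination helper used by the loop's proof argument and decreasing_by: while the guard
-- holds, i ≤ n//(n//i), so the next index b+1 is strictly larger than i
theorem csod_i_le_b (n i : Int) (h2 : 2 ≤ i) (h : i ≤ PySem.Int.floordiv n 2) :
    i ≤ PySem.Int.floordiv n (PySem.Int.floordiv n i) := by
  have h2i : i * 2 ≤ n := (PySem.Int.le_floordiv_iff_mul_le (by norm_num)).mp h
  have hi0 : 0 < i := by omega
  have hk2 : 2 ≤ PySem.Int.floordiv n i := by
    rw [PySem.Int.le_floordiv_iff_mul_le hi0]; linarith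
  have hki := PySem.Int.floordiv_mul_add_mod n i
  have hmod : 0 ≤ PySem.Int.mod n i := by
    rw [PySem.Int.mod_eq_emod_of_pos hi0]; exact Int.emod_nonneg n (by omega)
  rw [PySem.Int.le_floordiv_iff_mul_le (by omega)]
  calc i * PySem.Int.floordiv n i = PySem.Int.floordiv n i * i := by ring
    _ ≤ n := by omega

-- A's while loop (k, b, c inlined); the proof argument carries the loop invariant 2 ≤ i
def csodLoop (n i answer : Int) (hi : 2 ≤ i) : Int :=
  if h : i ≤ PySem.Int.floordiv n 2 then
    csodLoop n (PySem.Int.floordiv n (PySem.Int.floordiv n i) + 1)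
      (PySem.Int.mod (answer +
        PySem.Int.floordiv ((PySem.Int.floordiv n i - 1) *
          (PySem.Int.floordiv n (PySem.Int.floordiv n i) - i + 1) *
          (i + PySem.Int.floordiv n (PySem.Int.floordiv n i))) 2) 1000000)
      (by have := csod_i_le_b n i hi h; omega)
  else answer
termination_by (PySem.Int.floordiv n 2 + 1 - i).toNat
decreasing_by
  have := csod_i_le_b n i hi h
  omega

def csod (n : Int) : Int := csodLoop n 2 0 (by norm_num)

-- ===== PORT B =====
-- B's hand-rolled integer square root: s = 1; while (s+1)*(s+1) <= n: s += 1
def isqrtLoop (n s : Int) : Int :=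
  if (s + 1) * (s + 1) ≤ n then isqrtLoop n (s + 1) else s
termination_by (n - s).toNat
decreasing_by
  have h1 : s + 1 ≤ (s + 1) * (s + 1) := by nlinarith [mul_self_nonneg (2 * s + 1)]
  omega

def csod_alt (n : Int) : Int :=
  PySem.Int.mod
    ((PySem.List.pyRange 2 (isqrtLoop n 1 + 1) 1).foldl
      (fun total q =>
        total + (PySem.Int.floordiv (PySem.Int.floordiv n q * (PySem.Int.floordiv n q + 1)) 2
          - PySem.Int.floordiv (isqrtLoop n 1 * (isqrtLoop n 1 + 1)) 2))
      ((PySem.List.pyRange 2 (isqrtLoop n 1 + 1) 1).foldl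
        (fun total i => total + (PySem.Int.floordiv n i - 1) * i) 0))
    1000000

-- ===== PRECONDITION & SPEC =====
def Spec_csod (n : Int) (out : Int) : Prop := out = csod_alt n
instance (n : Int) (out : Int) : Decidable (Spec_csod n out) := by unfold Spec_csod; infer_instance

-- ===== CLAIM (what is proved, stated in full; the proofs are below) =====
def Claim_equal_csod : Prop := ∀ (n : Int), Dom_csod n → Spec_csod n (csod n)

-- ===== LEMMAS AND PROOFS =====

-- the common summand
def csodTerm (n j : Int) : Int := (PySem.Int.floordiv n j - 1) * j

theorem gauss_pyRange (m : Nat) : ∀ a c : Int, c - a = m →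
    2 * (PySem.List.pyRange a c 1).sum = (c - a) * (a + c - 1) := by
  induction m with
  | zero =>
    intro a c hc
    rw [PySem.List.pyRange_one_eq_nil (by omega)]
    simp; omega
  | succ m ih =>
    intro a c hc
    rw [PySem.List.pyRange_one_cons (by omega)]
    have ih' := ih (a + 1) c (by omega)
    simp only [List.sum_cons]
    linear_combination ih'

theorem floordiv_const_on_block (n i j : Int) (h2 : 2 ≤ i) (hg : i ≤ PySem.Int.floordiv n 2)
    (hij : i ≤ j) (hjb : j ≤ PySem.Int.floordiv n (PySem.Int.floordiv n i)) :
    PySem.Int.floordiv n j = PySem.Int.floordiv n i := by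
  have hi0 : 0 < i := by omega
  have hj0 : 0 < j := by omega
  have h2i : i * 2 ≤ n := (PySem.Int.le_floordiv_iff_mul_le (by norm_num)).mp hg
  have hk2 : 2 ≤ PySem.Int.floordiv n i := by
    rw [PySem.Int.le_floordiv_iff_mul_le hi0]; linarith
  have hk0 : 0 < PySem.Int.floordiv n i := by omega
  have hkb := PySem.Int.floordiv_mul_add_mod n (PySem.Int.floordiv n i)
  have hmodk : 0 ≤ PySem.Int.mod n (PySem.Int.floordiv n i) := by
    rw [PySem.Int.mod_eq_emod_of_pos hk0]; exact Int.emod_nonneg n (by omega)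
  have hlow : PySem.Int.floordiv n i ≤ PySem.Int.floordiv n j := by
    rw [PySem.Int.le_floordiv_iff_mul_le hj0]
    have : PySem.Int.floordiv n i * j ≤ PySem.Int.floordiv n i *
        PySem.Int.floordiv n (PySem.Int.floordiv n i) :=
      mul_le_mul_of_nonneg_left hjb (by omega)
    nlinarith
  have hup : PySem.Int.floordiv n j < PySem.Int.floordiv n i + 1 := by
    rw [PySem.Int.floordiv_lt_iff_lt_mul hj0]
    have hni : n < (PySem.Int.floordiv n i + 1) * i := by
      have := (PySem.Int.floordiv_lt_iff_lt_mul hi0 (a := n)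
        (q := PySem.Int.floordiv n i + 1)).mp (by omega)
      exact this
    have : (PySem.Int.floordiv n i + 1) * i ≤ (PySem.Int.floordiv n i + 1) * j :=
      mul_le_mul_of_nonneg_left hij (by omega)
    omega
  omega

-- the value A adds in one block equals the term-by-term sum over that block
theorem block_sum (n i : Int) (h2 : 2 ≤ i) (hg : i ≤ PySem.Int.floordiv n 2) :
    ((PySem.List.pyRange i (PySem.Int.floordiv n (PySem.Int.floordiv n i) + 1) 1).map
        (csodTerm n)).sum =
      PySem.Int.floordiv ((PySem.Int.floordiv n i - 1) *
        (PySem.Int.floordiv n (PySem.Int.floordiv n i) - i + 1) *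
        (i + PySem.Int.floordiv n (PySem.Int.floordiv n i))) 2 := by
  have hib := csod_i_le_b n i h2 hg
  set k := PySem.Int.floordiv n i with hk
  set b := PySem.Int.floordiv n (PySem.Int.floordiv n i) with hb
  have hmap : (PySem.List.pyRange i (b + 1) 1).map (csodTerm n) =
      (PySem.List.pyRange i (b + 1) 1).map (fun j => (k - 1) * j) := by
    apply List.map_congr_left
    intro j hj
    rw [PySem.List.mem_pyRange_one] at hj
    unfold csodTerm
    rw [floordiv_const_on_block n i j h2 hg hj.1 (by omega)]
  rw [hmap]
  have hsum : ((PySem.List.pyRange i (b + 1) 1).map (fun j => (k - 1) * j)).sum =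
      (k - 1) * (PySem.List.pyRange i (b + 1) 1).sum := by
    induction (PySem.List.pyRange i (b + 1) 1) with
    | nil => simp
    | cons x xs ih => simp [ih]; ring
  rw [hsum]
  have hgauss := gauss_pyRange (b + 1 - i).toNat i (b + 1) (by omega)
  have heq : (k - 1) * (b - i + 1) * (i + b) =
      2 * ((k - 1) * (PySem.List.pyRange i (b + 1) 1).sum) := by
    linear_combination (1 - k) * hgauss
  rw [heq, PySem.Int.floordiv_eq_ediv_of_pos (by norm_num)]
  exact (Int.mul_ediv_cancel_left _ (by norm_num : (2:Int) ≠ 0)).symm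

-- A's loop computes the running sum mod 1000000 of all remaining terms
theorem loopA (m : Nat) : ∀ (n i : Int) (hi : 2 ≤ i)
    (hm : (PySem.Int.floordiv n 2 + 1 - i).toNat ≤ m) (a : Int),
    0 ≤ a → a < 1000000 →
    csodLoop n i a hi =
      (a + ((PySem.List.pyRange i (PySem.Int.floordiv n 2 + 1) 1).map (csodTerm n)).sum)
        % 1000000 := by
  induction m with
  | zero =>
    intro n i hi hm a h0 h1
    rw [csodLoop]
    have hguard : ¬ i ≤ PySem.Int.floordiv n 2 := by omega
    rw [dif_neg hguard, PySem.List.pyRange_one_eq_nil (by omega)]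
    simp
    omega
  | succ m ih =>
    intro n i hi hm a h0 h1
    rw [csodLoop]
    by_cases hguard : i ≤ PySem.Int.floordiv n 2
    · rw [dif_pos hguard]
      have hib := csod_i_le_b n i hi hguard
      set b := PySem.Int.floordiv n (PySem.Int.floordiv n i) with hb
      have hble : b ≤ PySem.Int.floordiv n 2 := by
        have hi0 : 0 < i := by omega
        have h2i : i * 2 ≤ n := (PySem.Int.le_floordiv_iff_mul_le (by norm_num)).mp hguard
        have hk2 : 2 ≤ PySem.Int.floordiv n i := by
          rw [PySem.Int.le_floordiv_iff_mul_le hi0]; linarith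
        have hkb := PySem.Int.floordiv_mul_add_mod n (PySem.Int.floordiv n i)
        have hmodk : 0 ≤ PySem.Int.mod n (PySem.Int.floordiv n i) := by
          rw [PySem.Int.mod_eq_emod_of_pos (by omega)]; exact Int.emod_nonneg n (by omega)
        rw [PySem.Int.le_floordiv_iff_mul_le (by norm_num)]
        nlinarith
      have hmodpos : (0:Int) < 1000000 := by norm_num
      rw [ih n (b + 1) (by omega) (by omega) _
        (by rw [PySem.Int.mod_eq_emod_of_pos hmodpos]; exact Int.emod_nonneg _ (by norm_num))
        (by rw [PySem.Int.mod_eq_emod_of_pos hmodpos]; exact Int.emod_lt_of_pos _ hmodpos)]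
      rw [PySem.List.pyRange_one_append i (b + 1) (PySem.Int.floordiv n 2 + 1)
        (by omega) (by omega)]
      rw [List.map_append, List.sum_append, ← block_sum n i hi hguard]
      rw [PySem.Int.mod_eq_emod_of_pos hmodpos, Int.emod_add_emod]
      congr 1
      ring
    · rw [dif_neg hguard, PySem.List.pyRange_one_eq_nil (by omega)]
      simp
      omega

-- ---- B-side lemmas ----

theorem isqrtLoop_spec (n : Int) (m : Nat) : ∀ s : Int, 1 ≤ s → (n - s).toNat ≤ m →
    s ≤ isqrtLoop n s ∧ n < (isqrtLoop n s + 1) * (isqrtLoop n s + 1) ∧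
      (isqrtLoop n s * isqrtLoop n s ≤ n ∨ isqrtLoop n s = s) := by
  induction m with
  | zero =>
    intro s hs hm
    rw [isqrtLoop]
    have hguard : ¬ (s + 1) * (s + 1) ≤ n := by
      intro hg
      have h1 : s + 1 ≤ (s + 1) * (s + 1) := by nlinarith [mul_self_nonneg (2 * s + 1)]
      omega
    rw [if_neg hguard]
    exact ⟨le_refl s, by omega, Or.inr rfl⟩
  | succ m ih =>
    intro s hs hm
    rw [isqrtLoop]
    by_cases hguard : (s + 1) * (s + 1) ≤ n
    · rw [if_pos hguard]
      have h1 : s + 1 ≤ (s + 1) * (s + 1) := by nlinarith [mul_self_nonneg (2 * s + 1)]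
      obtain ⟨ha, hb, hc⟩ := ih (s + 1) (by omega) (by omega)
      refine ⟨by omega, hb, ?_⟩
      rcases hc with h | h
      · exact Or.inl h
      · exact Or.inl (by rw [h]; exact hguard)
    · rw [if_neg hguard]
      exact ⟨le_refl s, by omega, Or.inr rfl⟩

-- bridge: a mapped pyRange sum is the Finset.Ico sum
theorem sum_pyRange_map (f : Int → Int) (m : Nat) : ∀ a b : Int, (b - a).toNat ≤ m →
    ((PySem.List.pyRange a b 1).map f).sum = ∑ i ∈ Finset.Ico a b, f i := by
  induction m with
  | zero =>
    intro a b hm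
    rw [PySem.List.pyRange_one_eq_nil (by omega), Finset.Ico_eq_empty (by omega)]
    simp
  | succ m ih =>
    intro a b hm
    by_cases hab : a < b
    · rw [PySem.List.pyRange_one_cons hab]
      have hins : Finset.Ico a b = insert a (Finset.Ico (a + 1) b) := by
        ext x; simp [Finset.mem_Ico]; omega
      rw [hins, Finset.sum_insert (by simp [Finset.mem_Ico])]
      simp only [List.map_cons, List.sum_cons]
      rw [ih (a + 1) b (by omega)]
    · rw [PySem.List.pyRange_one_eq_nil (by omega), Finset.Ico_eq_empty (by omega)]
      simp

-- triangular numbers: x*(x+1)//2 is exact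
theorem tri_exact (x : Int) : 2 * PySem.Int.floordiv (x * (x + 1)) 2 = x * (x + 1) := by
  obtain ⟨t, ht⟩ := Int.even_mul_succ_self x
  rw [PySem.Int.floordiv_eq_ediv_of_pos (by norm_num), ht]
  have h2 : t + t = 2 * t := by ring
  rw [h2, Int.mul_ediv_cancel_left _ (by norm_num : (2:Int) ≠ 0)]

-- Gauss over an Ico of integers, in B's floordiv form
theorem sum_Ico_id (s h : Int) (hsh : s ≤ h) :
    ∑ i ∈ Finset.Ico (s + 1) (h + 1), i =
      PySem.Int.floordiv (h * (h + 1)) 2 - PySem.Int.floordiv (s * (s + 1)) 2 := by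
  have e1 : ((PySem.List.pyRange (s + 1) (h + 1) 1).map (fun i => i)).sum =
      ∑ i ∈ Finset.Ico (s + 1) (h + 1), i :=
    sum_pyRange_map (fun i => i) (h + 1 - (s + 1)).toNat (s + 1) (h + 1) le_rfl
  rw [List.map_id'] at e1
  have hg := gauss_pyRange (h + 1 - (s + 1)).toNat (s + 1) (h + 1) (by omega)
  have t1 := tri_exact h
  have t2 := tri_exact s
  have hp : (h + 1 - (s + 1)) * ((s + 1) + (h + 1) - 1) = h * (h + 1) - s * (s + 1) := by ring
  rw [hp] at hg
  linarith
-- the hyperbola swap: the tail sum over i in (s, n//2] equals B's second loop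
theorem hyperbola (n s : Int) (hs2 : 2 ≤ s) (hsq : s * s ≤ n) (hup : n < (s + 1) * (s + 1)) :
    ((PySem.List.pyRange (s + 1) (PySem.Int.floordiv n 2 + 1) 1).map (csodTerm n)).sum =
    ((PySem.List.pyRange 2 (s + 1) 1).map (fun q =>
        PySem.Int.floordiv (PySem.Int.floordiv n q * (PySem.Int.floordiv n q + 1)) 2
          - PySem.Int.floordiv (s * (s + 1)) 2)).sum := by
  rw [sum_pyRange_map _ (PySem.Int.floordiv n 2 + 1 - (s + 1)).toNat _ _ le_rfl]
  rw [sum_pyRange_map _ (s + 1 - 2).toNat _ _ le_rfl]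
  have step1 : ∀ i ∈ Finset.Ico (s + 1) (PySem.Int.floordiv n 2 + 1),
      csodTerm n i = ∑ _q ∈ Finset.Ico 2 (PySem.Int.floordiv n i + 1), i := by
    intro i hi
    rw [Finset.mem_Ico] at hi
    have hi0 : 0 < i := by omega
    have h2i : i * 2 ≤ n := (PySem.Int.le_floordiv_iff_mul_le (by norm_num)).mp (by omega)
    have hk2 : 2 ≤ PySem.Int.floordiv n i := by
      rw [PySem.Int.le_floordiv_iff_mul_le hi0]; linarith
    rw [Finset.sum_const, Int.card_Ico, nsmul_eq_mul, Int.toNat_of_nonneg (by omega)]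
    unfold csodTerm
    ring
  rw [Finset.sum_congr rfl step1]
  have hiff : ∀ (i q : Int),
      (i ∈ Finset.Ico (s + 1) (PySem.Int.floordiv n 2 + 1) ∧
        q ∈ Finset.Ico 2 (PySem.Int.floordiv n i + 1)) ↔
      (i ∈ Finset.Ico (s + 1) (PySem.Int.floordiv n q + 1) ∧
        q ∈ Finset.Ico 2 (s + 1)) := by
    intro i q
    simp only [Finset.mem_Ico]
    constructor
    · rintro ⟨⟨hi1, hi2⟩, hq1, hq2⟩
      have hi0 : 0 < i := by omega
      have hqin : q * i ≤ n := (PySem.Int.le_floordiv_iff_mul_le hi0).mp (by omega)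
      have hqs : q ≤ s := by
        by_contra hqs
        push_neg at hqs
        have : (s + 1) * (s + 1) ≤ q * i :=
          mul_le_mul (by omega) (by omega) (by omega) (by omega)
        omega
      refine ⟨⟨hi1, ?_⟩, hq1, by omega⟩
      have : i ≤ PySem.Int.floordiv n q := by
        rw [PySem.Int.le_floordiv_iff_mul_le (by omega)]; nlinarith
      omega
    · rintro ⟨⟨hi1, hi2⟩, hq1, hq2⟩
      have hq0 : 0 < q := by omega
      have hiq : i * q ≤ n := (PySem.Int.le_floordiv_iff_mul_le hq0).mp (by omega)
      have hi2' : i ≤ PySem.Int.floordiv n 2 := by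
        rw [PySem.Int.le_floordiv_iff_mul_le (by norm_num)]
        have : i * 2 ≤ i * q := mul_le_mul_of_nonneg_left (by omega) (by omega)
        omega
      have hqni : q ≤ PySem.Int.floordiv n i := by
        rw [PySem.Int.le_floordiv_iff_mul_le (by omega)]; nlinarith
      exact ⟨⟨hi1, by omega⟩, hq1, by omega⟩
  rw [Finset.sum_comm' hiff]
  apply Finset.sum_congr rfl
  intro q hq
  rw [Finset.mem_Ico] at hq
  have hsh : s ≤ PySem.Int.floordiv n q := by
    rw [PySem.Int.le_floordiv_iff_mul_le (by omega)]
    have : s * q ≤ s * s := mul_le_mul_of_nonneg_left (by omega) (by omega)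
    omega
  exact sum_Ico_id s (PySem.Int.floordiv n q) hsh

-- ===== VERDICT (by name: the statement is the Claim_ definition above) =====
theorem csod_spec : Claim_equal_csod := by
  intro n _
  unfold Spec_csod csod csod_alt
  rw [loopA ((PySem.Int.floordiv n 2 + 1 - 2).toNat) n 2 (by norm_num) le_rfl 0
    (by norm_num) (by norm_num)]
  rw [PySem.List.foldl_add, PySem.List.foldl_add]
  set s := isqrtLoop n 1 with hsdef
  obtain ⟨hs1, hsup, hsq⟩ := isqrtLoop_spec n (n - 1).toNat 1 (by norm_num) le_rfl
  rw [← hsdef] at hs1 hsup hsq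
  have hmodpos : (0:Int) < 1000000 := by norm_num
  by_cases hn : 4 ≤ n
  · have hss : s * s ≤ n := by
      rcases hsq with h | h
      · exact h
      · rw [h]; omega
    have hs2 : 2 ≤ s := by
      by_contra hc
      have hseq : s = 1 := by omega
      rw [hseq] at hsup
      omega
    have hsm : s ≤ PySem.Int.floordiv n 2 := by
      rw [PySem.Int.le_floordiv_iff_mul_le (by norm_num)]
      nlinarith
    rw [PySem.List.pyRange_one_append 2 (s + 1) (PySem.Int.floordiv n 2 + 1)
      (by omega) (by omega)]
    rw [List.map_append, List.sum_append]
    have hBmap : ((PySem.List.pyRange 2 (s + 1) 1).map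
        (fun i => (PySem.Int.floordiv n i - 1) * i)) =
        (PySem.List.pyRange 2 (s + 1) 1).map (csodTerm n) := rfl
    rw [hBmap, hyperbola n s hs2 hss hsup]
    rw [PySem.Int.mod_eq_emod_of_pos hmodpos]
    congr 1
    ring
  · have hseq : s = 1 := by
      rcases hsq with h | h
      · by_contra hc
        have : 2 ≤ s := by omega
        nlinarith
      · exact h
    have hhalf : PySem.Int.floordiv n 2 < 2 := by
      rw [PySem.Int.floordiv_lt_iff_lt_mul (by norm_num)]
      omega
    rw [hseq]
    rw [PySem.List.pyRange_one_eq_nil (a := 2) (b := PySem.Int.floordiv n 2 + 1) (by omega)]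
    rw [PySem.List.pyRange_one_eq_nil (a := 2) (b := (1:Int) + 1) (by norm_num)]
    simp [PySem.Int.mod_eq_emod_of_pos hmodpos]
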